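-- pv_equiv track=rewrite | github.com/bnznamco/django-structured-field | structured/migrations/structured_json_migration.py | _build_field_check
-- ===== SOURCE A (Python) =====
-- from typing import Dict, List, Any, Callable, Tuple
--
-- def _build_field_check(field_parts: List[str], operation: str) -> str:
--     """Build a field existence check."""
--     if len(field_parts) == 1:
--         return f"'{field_parts[0]}' {operation} transformed"
--
--     checks = []
--     current_path = "transformed"
--     for part in field_parts[:-1]:
--         checks.append(f"'{part}' in {current_path}")
--         current_path += f"['{part}']"
--
--     final_check = f"'{field_parts[-1]}' {operation} {current_path}"
--
--     if operation == 'in':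
--         return ' and '.join(checks + [final_check])
--     else:  # 'not in'
--         return final_check if len(checks) == 0 else f"({' and '.join(checks)}) and {final_check}"
-- ===== SOURCE B (Python) =====
-- def _build_field_check(field_parts, operation):
--     """Build a field existence check."""
--     n = len(field_parts)
--     paths = ["transformed" + "".join(f"['{p}']" for p in field_parts[:i]) for i in range(n)]
--     checks = [f"'{part}' in {path}" for part, path in zip(field_parts[:-1], paths[:-1])]
--     final_check = f"'{field_parts[-1]}' {operation} {paths[-1]}"
--     if operation == 'in' or not checks:
--         return ' and '.join(checks + [final_check])
--     return f"({' and '.join(checks)}) and {final_check}"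
-- ===== Notes on version B (the rewrite author's own statement) =====
-- stated objective: simpler
-- what changed: Replaced the state-threading accumulator loop (checks list + current_path string mutated together) by a precompute-then-combine decomposition: prefix paths are built independently by comprehension, checks come from zip(parts, paths), and the redundant len==1 special case and the separate 'not in'-with-no-checks case are merged into one join branch.
-- outside the precondition, e.g. on _build_field_check([], 'in'): A raises IndexError, B raises IndexError
import Mathlib
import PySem

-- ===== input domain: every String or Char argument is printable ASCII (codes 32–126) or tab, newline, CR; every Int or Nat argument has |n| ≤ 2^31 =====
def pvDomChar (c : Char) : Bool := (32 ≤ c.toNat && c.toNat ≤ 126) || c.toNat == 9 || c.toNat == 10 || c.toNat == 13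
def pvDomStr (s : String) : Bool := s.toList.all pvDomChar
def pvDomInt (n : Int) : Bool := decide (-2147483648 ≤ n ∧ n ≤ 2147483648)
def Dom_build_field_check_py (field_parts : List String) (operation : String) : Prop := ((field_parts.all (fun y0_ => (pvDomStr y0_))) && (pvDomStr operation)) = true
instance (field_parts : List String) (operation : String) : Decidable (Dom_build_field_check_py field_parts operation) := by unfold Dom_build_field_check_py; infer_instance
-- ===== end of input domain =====

-- B replaces A's state-threading accumulator loop by a precompute-then-combine decomposition
-- (prefix paths built independently, checks via zip) and drops the redundant single-part branch;
-- objective: simpler. Equivalence of RETURN values on nonempty field_parts.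

-- ===== PORT A =====
def build_field_check_py (field_parts : List String) (operation : String) : String :=
  if field_parts.length == 1 then
    "'" ++ PySem.List.pyGetD field_parts 0 "" ++ "' " ++ operation ++ " transformed"
  else
    let st := (PySem.List.slice field_parts none (some (-1))).foldl
      (fun (st : List String × String) part =>
        (st.1 ++ ["'" ++ part ++ "' in " ++ st.2], st.2 ++ "['" ++ part ++ "']"))
      ([], "transformed")
    let final_check := "'" ++ PySem.List.pyGetD field_parts (-1) "" ++ "' " ++ operation ++ " " ++ st.2
    if operation == "in" then
      PySem.Str.join " and " (st.1 ++ [final_check])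
    else
      if st.1.length == 0 then final_check
      else "(" ++ PySem.Str.join " and " st.1 ++ ") and " ++ final_check

-- ===== PORT B =====
def build_field_check_py_alt (field_parts : List String) (operation : String) : String :=
  let paths := (List.range field_parts.length).map
    (fun i => "transformed" ++ PySem.Str.join "" ((field_parts.take i).map (fun p => "['" ++ p ++ "']")))
  let checks := ((PySem.List.slice field_parts none (some (-1))).zip paths.dropLast).map
    (fun pq => "'" ++ pq.1 ++ "' in " ++ pq.2)
  let final_check := "'" ++ PySem.List.pyGetD field_parts (-1) "" ++ "' " ++ operation ++ " " ++ PySem.List.pyGetD paths (-1) ""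
  if operation == "in" || checks.isEmpty then
    PySem.Str.join " and " (checks ++ [final_check])
  else
    "(" ++ PySem.Str.join " and " checks ++ ") and " ++ final_check

-- ===== PRECONDITION & SPEC =====
-- Pre_ excludes only the empty list, on which both Pythons raise IndexError (field_parts[-1]).
def Pre_build_field_check_py (field_parts : List String) (operation : String) : Prop :=
  field_parts ≠ []
instance (field_parts : List String) (operation : String) : Decidable (Pre_build_field_check_py field_parts operation) := by unfold Pre_build_field_check_py; infer_instance
def pvWitness_build_field_check_py : List String × String := (["a", "b"], "in")

def Spec_build_field_check_py (field_parts : List String) (operation : String) (out : String) : Prop := out = build_field_check_py_alt field_parts operation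
instance (field_parts : List String) (operation : String) (out : String) : Decidable (Spec_build_field_check_py field_parts operation out) := by unfold Spec_build_field_check_py; infer_instance

-- ===== CLAIM (what is proved, stated in full; the proofs are below) =====
def Claim_equal_build_field_check_py : Prop := ∀ (field_parts : List String) (operation : String), Dom_build_field_check_py field_parts operation → Pre_build_field_check_py field_parts operation → Spec_build_field_check_py field_parts operation (build_field_check_py field_parts operation)

-- ===== LEMMAS AND PROOFS =====

def pvTag (p : String) : String := "['" ++ p ++ "']"

def pvChk : List String → String → List String
  | [], _ => []
  | p :: ps, path => ("'" ++ p ++ "' in " ++ path) :: pvChk ps (path ++ pvTag p)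

def pvPth : List String → String → String
  | [], path => path
  | p :: ps, path => pvPth ps (path ++ pvTag p)

theorem pv_join_nil : PySem.Str.join "" ([] : List String) = "" := by
  simp [PySem.Str.join, PySem.Chars.join, List.intercalate]

theorem pv_join_cons (a : String) (xs : List String) :
    PySem.Str.join "" (a :: xs) = a ++ PySem.Str.join "" xs := by
  cases xs <;> simp [PySem.Str.join, PySem.Chars.join, List.intercalate]

theorem pv_join_singleton (sep s : String) : PySem.Str.join sep [s] = s := by
  simp [PySem.Str.join, PySem.Chars.join, List.intercalate]

theorem pv_foldA (l : List String) (cs : List String) (path : String) :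
    l.foldl (fun (st : List String × String) part =>
        (st.1 ++ ["'" ++ part ++ "' in " ++ st.2], st.2 ++ "['" ++ part ++ "']"))
      (cs, path)
      = (cs ++ pvChk l path, pvPth l path) := by
  induction l generalizing cs path with
  | nil => simp [pvChk, pvPth]
  | cons p ps ih =>
      simp only [List.foldl_cons, pvChk, pvPth, pvTag]
      rw [ih]
      simp [String.append_assoc]

theorem pv_pth_eq (l : List String) (pre : String) :
    pvPth l pre = pre ++ PySem.Str.join "" (l.map pvTag) := by
  induction l generalizing pre with
  | nil => simp [pvPth, pv_join_nil]
  | cons p ps ih => simp [pvPth, ih, pv_join_cons, String.append_assoc]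

theorem pv_chk_eq (l : List String) (pre : String) :
    (l.zip ((List.range l.length).map
        (fun i => pre ++ PySem.Str.join "" ((l.take i).map pvTag)))).map
      (fun pq => "'" ++ pq.1 ++ "' in " ++ pq.2)
      = pvChk l pre := by
  induction l generalizing pre with
  | nil => simp [pvChk]
  | cons p ps ih =>
      simp only [List.length_cons, List.range_succ_eq_map, List.map_cons, List.map_map,
        List.zip_cons_cons, List.take_zero, pvChk, List.map_nil,
        pv_join_nil]
      rw [← ih (pre ++ pvTag p)]
      congr 1
      · simp
      congr 1
      congr 1
      apply List.map_congr_left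
      intro i _
      simp [Function.comp, List.take_succ_cons, pv_join_cons, pvTag, String.append_assoc]

-- ===== VERDICT (by name: the statement is the Claim_ definition above) =====
theorem pv_main (l : List String) (x : String) (op : String) :
    build_field_check_py (l ++ [x]) op = build_field_check_py_alt (l ++ [x]) op := by
  cases l with
  | nil =>
      simp [build_field_check_py, build_field_check_py_alt, PySem.List.slice_to_neg_one, pv_join_singleton, pv_join_nil,
        List.range_succ, PySem.List.pyGetD, PySem.List.pyGet?_neg_one]
      have h : (" " : String) ++ "transformed" = " transformed" := rfl
      simp [String.append_assoc, h]
  | cons q qs =>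
      unfold build_field_check_py build_field_check_py_alt
      have hlen : (q :: qs ++ [x]).length = (q :: qs).length + 1 := by simp
      rw [hlen, List.range_succ]
      simp only [PySem.List.slice_to_neg_one, List.dropLast_concat, List.map_append,
        List.map_cons, List.map_nil, PySem.List.pyGetD_neg_one_append_singleton]
      rw [pv_foldA]
      rw [List.take_left]
      have hmap : (List.range (q :: qs).length).map
          (fun i => "transformed" ++ PySem.Str.join "" ((((q :: qs) ++ [x]).take i).map
            (fun p => "['" ++ p ++ "']")))
          = (List.range (q :: qs).length).map
          (fun i => "transformed" ++ PySem.Str.join "" (((q :: qs).take i).map pvTag)) := by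
        apply List.map_congr_left
        intro i hi
        rw [List.take_append_of_le_length (by simpa using (List.mem_range.mp hi).le)]
        rfl
      rw [hmap, pv_chk_eq, pv_pth_eq]
      have hne : (((q :: qs).length + 1) == 1) = false := by simp
      rw [hne]
      simp only [Bool.false_eq_true, if_false, List.nil_append, pvChk, pvTag]
      unfold pvTag
      by_cases hop : op == "in"
      · simp [hop]
      · simp [hop]

theorem build_field_check_py_spec : Claim_equal_build_field_check_py := by
  intro fp op _ hpre
  unfold Spec_build_field_check_py
  obtain ⟨l, x, rfl⟩ : ∃ l x, fp = l ++ [x] :=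
    ⟨fp.dropLast, fp.getLast hpre, (List.dropLast_concat_getLast hpre).symm⟩
  exact pv_main l x op
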